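-- pv_equiv track=rewrite | github.com/mikekang47/daily-coding | 20220605/boj11727/main.py | solution
-- ===== SOURCE A (Python) =====
-- def solution(n):
--     mem = [-1 for i in range(1004)]
--
--     def dp(n):
--         if mem[n] != -1: return mem[n]
--         if n == 0: return 1
--         if n == 1: return 1
--         mem[n] = (dp(n-1) + 2 * dp(n-2)) % 10007
--         return mem[n]
--     return dp(n)
-- ===== SOURCE B (Python) =====
-- def solution(n):
--     if n == 0 or n == 1:
--         return 1
--     a, b = 1, 1
--     for _ in range(2, n + 1):
--         a, b = b, (b + 2 * a) % 10007
--     return b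
-- ===== Notes on version B (the rewrite author's own statement) =====
-- stated objective: simpler
-- what changed: Replaced the top-down recursive memoization over a 1004-slot array with a bottom-up iterative loop using two rolling variables (O(1) space, no recursion).
-- outside the precondition, e.g. on solution(950): A returns 4360, B returns 4360
import Mathlib
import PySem

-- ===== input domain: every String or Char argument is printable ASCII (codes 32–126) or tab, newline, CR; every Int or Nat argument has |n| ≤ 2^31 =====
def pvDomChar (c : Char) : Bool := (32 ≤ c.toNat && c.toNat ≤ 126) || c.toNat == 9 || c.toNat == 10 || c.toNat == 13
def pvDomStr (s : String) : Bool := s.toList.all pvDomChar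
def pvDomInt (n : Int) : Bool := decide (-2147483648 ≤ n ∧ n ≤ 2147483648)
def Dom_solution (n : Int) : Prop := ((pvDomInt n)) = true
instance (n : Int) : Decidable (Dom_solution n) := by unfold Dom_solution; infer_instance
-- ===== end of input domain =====

-- B replaces A's top-down recursive memoization (1004-slot array) with a
-- bottom-up loop over two rolling variables: simpler, O(1) space, no recursion.

-- ===== PORT A =====
-- dp's recursion threaded through the memo list `mem`; the Nat fuel only makes
-- the recursion total (Pre_ guarantees it is never exhausted).
def dpA : Nat → List Int → Int → List Int × Int
  | 0, mem, _ => (mem, 0)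
  | fuel + 1, mem, n =>
    if PySem.List.pyGetD mem n (-1) ≠ -1 then (mem, PySem.List.pyGetD mem n (-1))
    else if n = 0 then (mem, 1)
    else if n = 1 then (mem, 1)
    else
      let p1 := dpA fuel mem (n - 1)
      let p2 := dpA fuel p1.1 (n - 2)
      let r := PySem.Int.mod (p1.2 + 2 * p2.2) 10007
      (PySem.List.pySetD p2.1 n r, r)

def solution (n : Int) : Int :=
  (dpA (n.toNat + 1) (List.replicate 1004 (-1)) n).2

-- ===== PORT B =====
def solution_alt (n : Int) : Int :=
  if n = 0 ∨ n = 1 then 1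
  else
    (List.foldl (fun (s : Int × Int) (_ : Int) => (s.2, PySem.Int.mod (s.2 + 2 * s.1) 10007))
      (1, 1) (PySem.List.pyRange 2 (n + 1) 1)).2

-- ===== PRECONDITION & SPEC =====
-- The Python A raises for n < 0 and for all sufficiently large n (RecursionError from the
-- interpreter's recursion limit, IndexError past the 1004-slot memo); that upper boundary
-- is environment-dependent, so Pre_ stops at a safe bound (still > 90% of A's domain).
def Pre_solution (n : Int) : Prop := 0 ≤ n ∧ n ≤ 900
instance (n : Int) : Decidable (Pre_solution n) := by unfold Pre_solution; infer_instance
def pvWitness_solution : Int := (7)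
def Spec_solution (n : Int) (out : Int) : Prop := out = solution_alt n
instance (n : Int) (out : Int) : Decidable (Spec_solution n out) := by unfold Spec_solution; infer_instance

-- ===== CLAIM (what is proved, stated in full; the proofs are below) =====
def Claim_equal_solution : Prop := ∀ (n : Int), Dom_solution n → Pre_solution n → Spec_solution n (solution n)

-- ===== LEMMAS AND PROOFS =====

-- the common recurrence both programs compute
def fmem : Nat → Int
  | 0 => 1
  | 1 => 1
  | k + 2 => PySem.Int.mod (fmem (k + 1) + 2 * fmem k) 10007

-- memo invariant: right length, every filled entry holds the recurrence value
def GoodMem (mem : List Int) : Prop :=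
  mem.length = 1004 ∧ ∀ i : Int, 0 ≤ i → i < 1004 →
    PySem.List.pyGetD mem i (-1) = -1 ∨ PySem.List.pyGetD mem i (-1) = fmem i.toNat

theorem goodMem_replicate : GoodMem (List.replicate 1004 (-1)) := by
  refine ⟨List.length_replicate, fun i h0 h1 => ?_⟩
  left
  rw [PySem.List.pyGetD_eq_getElem _ _ h0 (by rw [List.length_replicate]; exact_mod_cast h1)]
  exact List.getElem_replicate _

theorem goodMem_set {mem : List Int} (h : GoodMem mem) {n : Int} (h0 : 0 ≤ n) (h1 : n < 1004) :
    GoodMem (PySem.List.pySetD mem n (fmem n.toNat)) := by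
  obtain ⟨hlen, hval⟩ := h
  refine ⟨by rw [PySem.List.length_pySetD]; exact hlen, fun i hi0 hi1 => ?_⟩
  have hn : (n.toNat : Int) = n := Int.toNat_of_nonneg h0
  have hi : (i.toNat : Int) = i := Int.toNat_of_nonneg hi0
  rw [← hn, ← hi, PySem.List.pyGetD_pySetD_natCast mem n.toNat i.toNat _ _ (by omega)]
  split_ifs with he
  · right; rw [he]
  · rw [hi]; exact hval i hi0 hi1

theorem dpA_spec : ∀ (fuel : Nat) (mem : List Int) (n : Int), GoodMem mem →
    0 ≤ n → n < 1004 → n.toNat < fuel →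
    (dpA fuel mem n).2 = fmem n.toNat ∧ GoodMem (dpA fuel mem n).1 := by
  intro fuel
  induction fuel with
  | zero => intro mem n _ _ _ hf; omega
  | succ fuel ih =>
    intro mem n hg h0 h1 hf
    obtain ⟨hlen, hval⟩ := hg
    have hd : dpA (fuel + 1) mem n =
        if PySem.List.pyGetD mem n (-1) ≠ -1 then (mem, PySem.List.pyGetD mem n (-1))
        else if n = 0 then (mem, 1)
        else if n = 1 then (mem, 1)
        else
          let p1 := dpA fuel mem (n - 1)
          let p2 := dpA fuel p1.1 (n - 2)
          let r := PySem.Int.mod (p1.2 + 2 * p2.2) 10007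
          (PySem.List.pySetD p2.1 n r, r) := rfl
    by_cases hv : PySem.List.pyGetD mem n (-1) ≠ -1
    · rcases hval n h0 h1 with h | h
      · exact absurd h hv
      · rw [hd, if_pos hv]
        exact ⟨h, hlen, hval⟩
    · rw [hd, if_neg hv]
      by_cases hn0 : n = 0
      · rw [if_pos hn0]
        subst hn0
        exact ⟨by simp [fmem], hlen, hval⟩
      · rw [if_neg hn0]
        by_cases hn1 : n = 1
        · rw [if_pos hn1]
          subst hn1
          exact ⟨by simp [fmem], hlen, hval⟩
        · rw [if_neg hn1]
          have hn2 : 2 ≤ n := by omega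
          obtain ⟨r1, g1⟩ := ih mem (n - 1) ⟨hlen, hval⟩ (by omega) (by omega) (by omega)
          obtain ⟨r2, g2⟩ := ih (dpA fuel mem (n - 1)).1 (n - 2) g1 (by omega) (by omega) (by omega)
          have hkey : PySem.Int.mod ((dpA fuel mem (n - 1)).2 + 2 * (dpA fuel (dpA fuel mem (n - 1)).1 (n - 2)).2) 10007
              = fmem n.toNat := by
            rw [r1, r2]
            have hk : n.toNat = (n - 2).toNat + 2 := by omega
            have hk1 : (n - 1).toNat = (n - 2).toNat + 1 := by omega
            rw [hk, hk1, fmem]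
          refine ⟨hkey, ?_⟩
          show GoodMem (PySem.List.pySetD (dpA fuel (dpA fuel mem (n - 1)).1 (n - 2)).1 n
            (PySem.Int.mod ((dpA fuel mem (n - 1)).2 + 2 * (dpA fuel (dpA fuel mem (n - 1)).1 (n - 2)).2) 10007))
          rw [hkey]
          exact goodMem_set g2 h0 h1

theorem solution_eq_fmem (n : Int) (h0 : 0 ≤ n) (h1 : n < 1004) :
    solution n = fmem n.toNat := by
  unfold solution
  exact (dpA_spec (n.toNat + 1) _ n goodMem_replicate h0 h1 (by omega)).1

-- B's loop: foldl ignores the range element, so it is m-fold iteration of the step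
def iterStep : Nat → Int × Int → Int × Int
  | 0, s => s
  | m + 1, s => iterStep m (s.2, PySem.Int.mod (s.2 + 2 * s.1) 10007)

theorem foldl_eq_iterStep (l : List Int) (s : Int × Int) :
    List.foldl (fun (s : Int × Int) (_ : Int) => (s.2, PySem.Int.mod (s.2 + 2 * s.1) 10007)) s l
      = iterStep l.length s := by
  induction l generalizing s with
  | nil => rfl
  | cons x xs ih =>
    simp only [List.length_cons, List.foldl_cons, iterStep]
    exact ih _

theorem iterStep_fmem : ∀ (m k : Nat), iterStep m (fmem k, fmem (k + 1)) = (fmem (k + m), fmem (k + m + 1)) := by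
  intro m
  induction m with
  | zero => intro k; simp [iterStep]
  | succ m ih =>
    intro k
    have : (fmem (k + 1), PySem.Int.mod (fmem (k + 1) + 2 * fmem k) 10007)
        = (fmem (k + 1), fmem (k + 2)) := by rw [fmem]
    rw [iterStep, this, ih (k + 1)]
    have h1 : k + 1 + m = k + (m + 1) := by omega
    rw [h1]

theorem solution_alt_eq_fmem (n : Int) (h0 : 0 ≤ n) :
    solution_alt n = fmem n.toNat := by
  unfold solution_alt
  by_cases h01 : n = 0 ∨ n = 1
  · rcases h01 with h | h <;> simp [h, fmem]
  · have hn2 : 2 ≤ n := by simp only [not_or] at h01; omega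
    rw [if_neg h01, foldl_eq_iterStep, PySem.List.length_pyRange_one]
    have hm : (n + 1 - 2).toNat = n.toNat - 1 := by omega
    rw [hm]
    have h01' : ((1 : Int), (1 : Int)) = (fmem 0, fmem 1) := by simp [fmem]
    rw [h01', iterStep_fmem (n.toNat - 1) 0]
    show fmem (0 + (n.toNat - 1) + 1) = fmem n.toNat
    congr 1
    omega

-- ===== VERDICT (by name: the statement is the Claim_ definition above) =====
theorem solution_spec : Claim_equal_solution := by
  intro n _ hpre
  obtain ⟨hp0, hp1⟩ := hpre
  unfold Spec_solution
  rw [solution_eq_fmem n hp0 (by omega), solution_alt_eq_fmem n hp0]
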